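-- pv_equiv track=rewrite | github.com/pypi-data/pypi-mirror-397 | packages/axiom-engine/axiom_engine-1.0.0-py3-none-any.whl/axiom_forge/context_aware_backend.py | _looks_like_diff
-- ===== SOURCE A (Python) =====
-- def _looks_like_diff(text: str) -> bool:
--     """
--     Check if text looks like it contains a diff.
--
--     More lenient than _is_valid_diff_format.
--
--     Args:
--         text: The text to check.
--
--     Returns:
--         True if text appears to contain diff content.
--     """
--     # Check for diff markers
--     diff_markers = ["--- ", "+++ ", "@@ ", "```diff"]
--     for marker in diff_markers:
--         if marker in text:
--             return True
--
--     # Check for line-level changes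
--     lines = text.split("\n")
--     has_additions = any(line.startswith("+") and not line.startswith("+++") for line in lines)
--     has_deletions = any(line.startswith("-") and not line.startswith("---") for line in lines)
--
--     return has_additions or has_deletions
-- ===== SOURCE B (Python) =====
-- def _looks_like_diff(text: str) -> bool:
--     markers = ("--- ", "+++ ", "@@ ", "```diff")
--     at_line_start = True
--     for i in range(len(text)):
--         if text.startswith(markers, i):
--             return True
--         if at_line_start:
--             if text[i] == "+" and not text.startswith("+++", i):
--                 return True
--             if text[i] == "-" and not text.startswith("---", i):
--                 return True
--         at_line_start = text[i] == "\n"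
--     return False
-- ===== Notes on version B (the rewrite author's own statement) =====
-- stated objective: alternative
-- what changed: A does one substring scan per marker over the whole text plus two extra any() passes over split lines; B never splits the text at all: it is a single character-level scan that slides one position at a time, testing marker prefixes at each offset and +/- rules only at positions carrying an at-line-start flag, returning on the first hit.
import Mathlib
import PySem

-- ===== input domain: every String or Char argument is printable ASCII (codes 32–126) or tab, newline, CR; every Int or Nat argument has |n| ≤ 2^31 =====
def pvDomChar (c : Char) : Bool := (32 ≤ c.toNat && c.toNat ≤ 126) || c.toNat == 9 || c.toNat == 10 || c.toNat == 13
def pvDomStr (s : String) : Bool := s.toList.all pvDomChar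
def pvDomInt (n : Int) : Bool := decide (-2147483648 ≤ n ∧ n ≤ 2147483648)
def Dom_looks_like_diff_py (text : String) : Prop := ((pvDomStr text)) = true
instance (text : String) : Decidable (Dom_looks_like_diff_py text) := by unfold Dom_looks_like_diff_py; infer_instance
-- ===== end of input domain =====

-- B replaces A's staged passes (one substring scan per marker, then a split and two any() passes
-- over the lines) by one character-level scan that never splits the text: at each offset it tests
-- marker prefixes, and the +/- rules only where an at-line-start flag is set; same return value.

-- ===== PORT A =====
def looks_like_diff_py (text : String) : Bool :=
  let diff_markers : List (List Char) :=
    ["--- ".toList, "+++ ".toList, "@@ ".toList, "```diff".toList]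
  -- for marker in diff_markers: if marker in text: return True
  if diff_markers.any (fun marker => PySem.Chars.isIn marker text.toList) then true
  else
    let lines := PySem.Chars.splitOn text.toList ['\n']
    let has_additions := lines.any (fun line =>
      PySem.Chars.startswith line ['+'] && !PySem.Chars.startswith line ['+', '+', '+'])
    let has_deletions := lines.any (fun line =>
      PySem.Chars.startswith line ['-'] && !PySem.Chars.startswith line ['-', '-', '-'])
    has_additions || has_deletions

-- ===== PORT B =====
-- the markers tuple of Source B
def pvMarkers : List (List Char) := ["--- ".toList, "+++ ".toList, "@@ ".toList, "```diff".toList]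

-- the loop of Source B: one pass over the characters, `atStart` is the at_line_start flag;
-- text.startswith(pat, i) is a pure prefix test of pat against the suffix at i (exact here:
-- List.isPrefixOf on the remaining characters).
def pvScan : Bool → List Char → Bool
  | _, [] => false
  | atStart, c :: rest =>
    if pvMarkers.any (fun m => m.isPrefixOf (c :: rest)) then true
    else if atStart && (c == '+') && !(['+', '+', '+'].isPrefixOf (c :: rest)) then true
    else if atStart && (c == '-') && !(['-', '-', '-'].isPrefixOf (c :: rest)) then true
    else pvScan (c == '\n') rest

def looks_like_diff_py_alt (text : String) : Bool := pvScan true text.toList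

-- ===== PRECONDITION & SPEC =====
def Spec_looks_like_diff_py (text : String) (out : Bool) : Prop := out = looks_like_diff_py_alt text
instance (text : String) (out : Bool) : Decidable (Spec_looks_like_diff_py text out) := by unfold Spec_looks_like_diff_py; infer_instance

-- ===== CLAIM (what is proved, stated in full; the proofs are below) =====
def Claim_equal_looks_like_diff_py : Prop := ∀ (text : String), Dom_looks_like_diff_py text → Spec_looks_like_diff_py text (looks_like_diff_py text)

-- ===== LEMMAS AND PROOFS =====

-- A structural model of PySem.Chars.splitOn s ['\n'] (first line, remaining lines).
def pvSplitcAux (c : Char) : List Char → List Char × List (List Char)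
  | [] => ([], [])
  | x :: rest =>
    let p := pvSplitcAux c rest
    if x = c then ([], p.1 :: p.2) else (x :: p.1, p.2)

theorem pvSplitcAux_fst (c : Char) (l : List Char) :
    (pvSplitcAux c l).1 = l.takeWhile (fun x => x ≠ c) := by
  induction l with
  | nil => rfl
  | cons x rest ih =>
    simp only [pvSplitcAux, List.takeWhile]
    by_cases h : x = c <;> simp [h, ih]

theorem pvGo_eq (c : Char) (l : List Char) :
    ∀ (fuel : Nat) (cur : List Char) (acc : List (List Char)), l.length ≤ fuel →
    PySem.Chars.splitOn.go [c] fuel l cur acc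
      = acc.reverse ++ (cur.reverse ++ (pvSplitcAux c l).1) :: (pvSplitcAux c l).2 := by
  induction l with
  | nil =>
    intro fuel cur acc _
    cases fuel <;> simp [PySem.Chars.splitOn.go, pvSplitcAux]
  | cons x rest ih =>
    intro fuel cur acc hf
    cases fuel with
    | zero => simp at hf
    | succ f =>
      simp only [PySem.Chars.splitOn.go]
      by_cases hx : x = c
      · subst hx
        have hp : List.isPrefixOf [x] (x :: rest) = true := by
          simp [List.isPrefixOf]
        rw [if_pos hp]
        have : List.drop (List.length [x]) (x :: rest) = rest := by simp
        rw [this, ih f [] (cur.reverse :: acc) (by simpa using Nat.le_of_succ_le_succ hf)]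
        simp [pvSplitcAux]
      · have hp : List.isPrefixOf [c] (x :: rest) = false := by
          simp [List.isPrefixOf]; exact fun h => absurd h.symm hx
        rw [if_neg (by simp [hp])]
        rw [ih f (x :: cur) acc (by simpa using Nat.le_of_succ_le_succ hf)]
        simp [pvSplitcAux, hx]

theorem splitOn_eq_pvSplitc (c : Char) (s : List Char) :
    PySem.Chars.splitOn s [c] = (pvSplitcAux c s).1 :: (pvSplitcAux c s).2 := by
  unfold PySem.Chars.splitOn
  rw [pvGo_eq c s (s.length + 1) [] [] (Nat.le_succ _)]
  simp

theorem prefix_takeWhile_of_all {p : Char → Bool} {s t : List Char}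
    (h : s <+: t) (ha : ∀ a ∈ s, p a = true) : s <+: t.takeWhile p := by
  induction s generalizing t with
  | nil => exact List.nil_prefix
  | cons a s ih =>
    obtain ⟨u, rfl⟩ := h
    simp only [List.cons_append, List.takeWhile]
    rw [ha a (by simp)]
    exact List.cons_prefix_cons.mpr ⟨rfl, ih (s.prefix_append u) (fun b hb => ha b (by simp [hb]))⟩

-- a newline-free pattern is a prefix of s iff it is a prefix of s's first line
theorem prefix_firstline_iff (p s : List Char) (hp : ∀ a ∈ p, a ≠ '\n') :
    p <+: (pvSplitcAux '\n' s).1 ↔ p <+: s := by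
  rw [pvSplitcAux_fst]
  constructor
  · exact fun h => h.trans (List.takeWhile_prefix _)
  · intro h
    exact prefix_takeWhile_of_all h (fun a ha => by simp [hp a ha])

-- the per-line condition that A's two any() passes test together
def pvPM (line : List Char) : Bool :=
  (PySem.Chars.startswith line ['+'] && !PySem.Chars.startswith line ['+', '+', '+'])
  || (PySem.Chars.startswith line ['-'] && !PySem.Chars.startswith line ['-', '-', '-'])

theorem sw_single (c : Char) (l : List Char) (d : Char) :
    PySem.Chars.startswith (c :: l) [d] = (c == d) := by
  rw [Bool.eq_iff_iff, PySem.Chars.startswith_iff]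
  simp only [List.cons_prefix_cons, List.nil_prefix, and_true, beq_iff_eq]
  exact eq_comm

theorem sw_line (s p : List Char) (hp : ∀ a ∈ p, a ≠ '\n') :
    PySem.Chars.startswith (pvSplitcAux '\n' s).1 p = p.isPrefixOf s := by
  rw [Bool.eq_iff_iff, PySem.Chars.startswith_iff, List.isPrefixOf_iff_prefix]
  exact prefix_firstline_iff p s hp

theorem isIn_cons (m : List Char) (c : Char) (rest : List Char) :
    PySem.Chars.isIn m (c :: rest) = (m.isPrefixOf (c :: rest) || PySem.Chars.isIn m rest) := by
  rw [Bool.eq_iff_iff]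
  simp only [Bool.or_eq_true, PySem.Chars.isIn_iff_infix, List.isPrefixOf_iff_prefix]
  exact List.infix_cons_iff

theorem pvAnyOrSplit (l : List (List Char)) (p q : List Char → Bool) :
    (l.any fun x => p x || q x) = (l.any p || l.any q) := by
  induction l with
  | nil => rfl
  | cons a l ih =>
    simp only [List.any_cons, ih]
    cases p a <;> cases q a <;> cases l.any p <;> cases l.any q <;> simp

-- the whole-text marker scan, peeled one character
theorem markers_cons (c : Char) (rest : List Char) :
    (pvMarkers.any fun m => PySem.Chars.isIn m (c :: rest))
      = ((pvMarkers.any fun m => m.isPrefixOf (c :: rest))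
         || (pvMarkers.any fun m => PySem.Chars.isIn m rest)) := by
  have h : (pvMarkers.any fun m => PySem.Chars.isIn m (c :: rest))
      = (pvMarkers.any fun m => m.isPrefixOf (c :: rest) || PySem.Chars.isIn m rest) := by
    rw [show (fun m => PySem.Chars.isIn m (c :: rest))
        = (fun m => m.isPrefixOf (c :: rest) || PySem.Chars.isIn m rest)
      from funext (fun m => isIn_cons m c rest)]
  rw [h, pvAnyOrSplit]

-- boolean shapes of one step of the scan
theorem pvBoolStep (b x y p q m a pm : Bool) (h : pm = (x && !p || y && !q)) :
    (if (b && x && !p) = true then true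
     else if (b && y && !q) = true then true
     else (m || false || a))
      = (m || (b && pm) || a) := by
  subst h
  cases b <;> cases x <;> cases y <;> cases p <;> cases q <;> cases m <;> cases a <;> rfl

theorem pvBoolNl (m p1 a : Bool) :
    (m || (true && p1) || a) = (m || false || (p1 || a)) := by
  cases m <;> cases p1 <;> cases a <;> rfl

-- invariant of B's scan: a marker anywhere in s, or +/- on the first line (only if the flag is
-- set), or +/- on a later line
theorem pvScan_eq (s : List Char) : ∀ (b : Bool),
    pvScan b s
      = ((pvMarkers.any fun m => PySem.Chars.isIn m s)
         || (b && pvPM (pvSplitcAux '\n' s).1)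
         || ((pvSplitcAux '\n' s).2.any pvPM)) := by
  induction s with
  | nil => intro b; cases b <;> decide
  | cons c rest ih =>
    intro b
    simp only [pvScan]
    rw [markers_cons]
    by_cases hm : (pvMarkers.any fun m => m.isPrefixOf (c :: rest)) = true
    · simp [hm]
    · simp only [Bool.not_eq_true] at hm
      simp only [hm, Bool.false_or, Bool.false_eq_true, if_false]
      by_cases hnl : c = '\n'
      · subst hnl
        have haux : pvSplitcAux '\n' ('\n' :: rest)
            = ([], (pvSplitcAux '\n' rest).1 :: (pvSplitcAux '\n' rest).2) := by
          simp [pvSplitcAux]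
        have h1 : ('\n' == '+') = false := by decide
        have h2 : ('\n' == '-') = false := by decide
        have h3 : ('\n' == '\n') = true := by decide
        have h0 : pvPM [] = false := by decide
        rw [haux]
        simp only [h1, h2, h3, Bool.and_false, Bool.false_and, Bool.false_eq_true, if_false,
          ih true, h0, List.any_cons]
        exact pvBoolNl (pvMarkers.any fun m => PySem.Chars.isIn m rest)
          (pvPM (pvSplitcAux '\n' rest).1) ((pvSplitcAux '\n' rest).2.any pvPM)
      · have haux : pvSplitcAux '\n' (c :: rest)
            = (c :: (pvSplitcAux '\n' rest).1, (pvSplitcAux '\n' rest).2) := by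
          simp [pvSplitcAux, hnl]
        have hflag : (c == '\n') = false := by simp [hnl]
        have hth1 : ∀ a ∈ ['+', '+', '+'], a ≠ '\n' := by
          intro a ha; fin_cases ha <;> decide
        have hth2 : ∀ a ∈ ['-', '-', '-'], a ≠ '\n' := by
          intro a ha; fin_cases ha <;> decide
        have hplus := sw_line (c :: rest) ['+', '+', '+'] hth1
        have hminus := sw_line (c :: rest) ['-', '-', '-'] hth2
        simp only [haux] at hplus hminus
        have hpm : pvPM (c :: (pvSplitcAux '\n' rest).1)
            = ((c == '+') && !(['+', '+', '+'].isPrefixOf (c :: rest))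
               || (c == '-') && !(['-', '-', '-'].isPrefixOf (c :: rest))) := by
          unfold pvPM
          rw [sw_single, sw_single, hplus, hminus]
        rw [hflag, ih false]
        simp only [haux, Bool.false_and]
        exact pvBoolStep b (c == '+') (c == '-') _ _ _ _ _ hpm

-- ===== VERDICT (by name: the statement is the Claim_ definition above) =====
theorem looks_like_diff_py_spec : Claim_equal_looks_like_diff_py := by
  intro text _
  unfold Spec_looks_like_diff_py looks_like_diff_py looks_like_diff_py_alt
  rw [pvScan_eq, splitOn_eq_pvSplitc]
  simp only [pvMarkers]
  have hany : ∀ (l : List (List Char)),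
      (l.any (fun line => PySem.Chars.startswith line ['+']
          && !PySem.Chars.startswith line ['+', '+', '+'])
       || l.any (fun line => PySem.Chars.startswith line ['-']
          && !PySem.Chars.startswith line ['-', '-', '-'])) = l.any pvPM := by
    intro l
    rw [← pvAnyOrSplit]
    rfl
  rw [hany]
  simp only [List.any_cons]
  cases (["--- ".toList, "+++ ".toList, "@@ ".toList, "```diff".toList].any
      fun marker => PySem.Chars.isIn marker text.toList) <;>
    cases pvPM (pvSplitcAux '\n' text.toList).1 <;>
    cases ((pvSplitcAux '\n' text.toList).2.any pvPM) <;> simp_all
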